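-- pv_equiv track=rewrite | github.com/zhangjp2046/ops-system | scripts/simple_snmp_mock.py | decode_oid
-- ===== SOURCE A (Python) =====
-- def decode_oid(oid_bytes):
--     """解码OID字节"""
--     if len(oid_bytes) == 0:
--         return None
--
--     oid = []
--     # 第一个字节: (first*40) + second
--     first = oid_bytes[0] // 40
--     second = oid_bytes[0] % 40
--     oid.append(first)
--     oid.append(second)
--
--     value = 0
--     for b in oid_bytes[1:]:
--         value = (value << 7) | (b & 0x7f)
--         if not (b & 0x80):
--             oid.append(value)
--             value = 0
--
--     return '.'.join(str(x) for x in oid)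
-- ===== SOURCE B (Python) =====
-- def _decode_group(group):
--     value = 0
--     for b in group:
--         value = (value << 7) | (b & 0x7f)
--     return value
--
--
-- def decode_oid(oid_bytes):
--     """Decode OID bytes: two-phase — split the tail into complete 7-bit groups, then decode each."""
--     if len(oid_bytes) == 0:
--         return None
--
--     # Phase 1: partition the tail into groups, each ending at a byte with the 0x80 bit clear.
--     groups = []
--     current = []
--     for b in oid_bytes[1:]:
--         current.append(b)
--         if not (b & 0x80):
--             groups.append(current)
--             current = []
--     # a trailing group whose last byte still has the continuation bit set is incomplete: drop it
--
--     # Phase 2: decode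
--     values = [oid_bytes[0] // 40, oid_bytes[0] % 40] + [_decode_group(g) for g in groups]
--     return '.'.join(str(v) for v in values)
-- ===== Notes on version B (the rewrite author's own statement) =====
-- stated objective: alternative
-- what changed: Replaces A's single-pass loop carrying a partial-value accumulator with a two-phase pass: first partition the tail into complete 7-bit-chunk groups (dropping an unterminated trailing group), then decode each group independently with a fold and join.
import Mathlib
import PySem

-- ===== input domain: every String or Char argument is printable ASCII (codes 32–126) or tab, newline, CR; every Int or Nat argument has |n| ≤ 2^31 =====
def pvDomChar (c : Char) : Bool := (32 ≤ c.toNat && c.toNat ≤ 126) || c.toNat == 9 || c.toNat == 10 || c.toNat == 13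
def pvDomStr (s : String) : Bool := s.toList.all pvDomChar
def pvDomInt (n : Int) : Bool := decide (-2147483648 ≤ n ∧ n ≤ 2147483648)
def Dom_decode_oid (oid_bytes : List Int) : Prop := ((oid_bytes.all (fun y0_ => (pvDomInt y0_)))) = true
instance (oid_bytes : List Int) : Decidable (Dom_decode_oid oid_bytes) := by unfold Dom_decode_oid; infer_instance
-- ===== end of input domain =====

-- B replaces A's single-pass accumulator loop by a two-phase pass (group, then decode each group); alternative decomposition, same cost.

-- ===== PORT A =====
-- Python 'value << 7' is exact multiplication by 128 for every int.
def decode_oid (oid_bytes : List Int) : Option String :=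
  match oid_bytes with
  | [] => none
  | b0 :: rest =>
    let first := PySem.Int.floordiv b0 40
    let second := PySem.Int.mod b0 40
    let s := rest.foldl
      (fun (s : List Int × Int) (b : Int) =>
        let v := PySem.Int.bor (s.2 * 128) (PySem.Int.band b 127)
        if PySem.Int.band b 128 = 0 then (s.1 ++ [v], 0) else (s.1, v))
      ([first, second], 0)
    some (PySem.Str.join "." (s.1.map PySem.Int.toStr))

-- ===== PORT B =====
def pvDecodeGroup (g : List Int) : Int :=
  g.foldl (fun v b => PySem.Int.bor (v * 128) (PySem.Int.band b 127)) 0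

def pvSplitGroups (cur : List Int) : List Int → List (List Int)
  | [] => []
  | b :: bs =>
    if PySem.Int.band b 128 = 0 then (cur ++ [b]) :: pvSplitGroups [] bs
    else pvSplitGroups (cur ++ [b]) bs

def decode_oid_alt (oid_bytes : List Int) : Option String :=
  match oid_bytes with
  | [] => none
  | b0 :: rest =>
    let groups := pvSplitGroups [] rest
    let vals := [PySem.Int.floordiv b0 40, PySem.Int.mod b0 40] ++ groups.map pvDecodeGroup
    some (PySem.Str.join "." (vals.map PySem.Int.toStr))

-- ===== PRECONDITION & SPEC =====
def Spec_decode_oid (oid_bytes : List Int) (out : Option String) : Prop := out = decode_oid_alt oid_bytes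
instance (oid_bytes : List Int) (out : Option String) : Decidable (Spec_decode_oid oid_bytes out) := by unfold Spec_decode_oid; infer_instance

-- ===== CLAIM (what is proved, stated in full; the proofs are below) =====
def Claim_equal_decode_oid : Prop := ∀ (oid_bytes : List Int), Dom_decode_oid oid_bytes → Spec_decode_oid oid_bytes (decode_oid oid_bytes)

-- ===== LEMMAS AND PROOFS =====

theorem pvDecodeGroup_snoc (g : List Int) (b : Int) :
    pvDecodeGroup (g ++ [b]) = PySem.Int.bor (pvDecodeGroup g * 128) (PySem.Int.band b 127) := by
  simp [pvDecodeGroup]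

-- loop invariant: A's fold, started with partial value 'decodeGroup cur', appends the decoded complete groups
theorem pv_loop (bs : List Int) : ∀ (cur oid : List Int) (v : Int), v = pvDecodeGroup cur →
    (bs.foldl
      (fun (s : List Int × Int) (b : Int) =>
        let v := PySem.Int.bor (s.2 * 128) (PySem.Int.band b 127)
        if PySem.Int.band b 128 = 0 then (s.1 ++ [v], 0) else (s.1, v))
      (oid, v)).1
    = oid ++ (pvSplitGroups cur bs).map pvDecodeGroup := by
  induction bs with
  | nil => intro cur oid v hv; simp [pvSplitGroups]
  | cons b bs ih =>
    intro cur oid v hv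
    by_cases hb : PySem.Int.band b 128 = 0
    · simp only [List.foldl_cons, hb, if_true]
      rw [ih [] (oid ++ [PySem.Int.bor (v * 128) (PySem.Int.band b 127)]) 0 (by simp [pvDecodeGroup])]
      simp [pvSplitGroups, hb, hv, pvDecodeGroup_snoc]
    · simp only [List.foldl_cons, hb, if_false]
      rw [ih (cur ++ [b]) oid _ (by rw [pvDecodeGroup_snoc, hv])]
      simp [pvSplitGroups, hb]

-- ===== VERDICT (by name: the statement is the Claim_ definition above) =====
theorem decode_oid_spec : Claim_equal_decode_oid := by
  intro oid_bytes _
  unfold Spec_decode_oid decode_oid decode_oid_alt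
  match oid_bytes with
  | [] => rfl
  | b0 :: rest =>
    simp only
    rw [pv_loop rest [] [PySem.Int.floordiv b0 40, PySem.Int.mod b0 40] 0 (by simp [pvDecodeGroup])]
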